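-- pv_equiv track=rewrite | github.com/whdgusdl48/Programmers_Algorithm | Level3/solution_2021_03_30.py | solution
-- ===== SOURCE A (Python) =====
-- def solution(n):
--     answer = 0
--     if n < 3:
--         return n
--     before1 = 1
--     before2 = 2
--
--     for i in range(3,n+1):
--         answer = before1 + before2
--         before1 = before2
--         before2 = answer
--     return answer % 1234567
-- ===== SOURCE B (Python) =====
-- def solution(n):
--     if n < 3:
--         return n
--     M = 1234567
--
--     def fd(k):
--         # returns (F(k) % M, F(k+1) % M) with F(1)=F(2)=1 (standard Fibonacci)
--         if k == 0:
--             return (0, 1)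
--         a, b = fd(k >> 1)
--         c = (a * (2 * b - a)) % M
--         d = (a * a + b * b) % M
--         if k & 1:
--             return (d, (c + d) % M)
--         return (c, d)
--
--     return fd(n + 1)[0]
-- ===== Notes on version B (the rewrite author's own statement) =====
-- stated objective: faster
-- what changed: Replaced the O(n) iterative accumulation loop by the fast-doubling Fibonacci recursion computed modulo the problem's modulus, giving the n-th term in O(log n) multiplications.
import Mathlib
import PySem

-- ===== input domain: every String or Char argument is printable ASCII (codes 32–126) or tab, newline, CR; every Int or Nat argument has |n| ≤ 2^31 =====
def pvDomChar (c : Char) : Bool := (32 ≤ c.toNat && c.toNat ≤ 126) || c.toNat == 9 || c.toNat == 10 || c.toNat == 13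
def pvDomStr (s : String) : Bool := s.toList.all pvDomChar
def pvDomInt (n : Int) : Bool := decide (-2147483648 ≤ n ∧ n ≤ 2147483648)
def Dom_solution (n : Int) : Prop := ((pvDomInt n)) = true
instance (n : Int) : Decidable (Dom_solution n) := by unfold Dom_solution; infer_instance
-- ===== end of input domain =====

-- B replaces A's linear accumulation loop by the fast-doubling Fibonacci recursion taken modulo the problem constant (faster).

-- ===== PORT A =====
-- the loop body: answer = before1 + before2; before1 = before2; before2 = answer
def solStepA (st : Int × Int × Int) (_ : Int) : Int × Int × Int :=
  (st.2.1 + st.2.2, st.2.2, st.2.1 + st.2.2)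

def solution (n : Int) : Int :=
  if n < 3 then n
  else
    let st := (PySem.List.pyRange 3 (n + 1) 1).foldl solStepA (0, 1, 2)
    PySem.Int.mod st.1 1234567

-- ===== PORT B =====
-- fd(k) = (F(k) % M, F(k+1) % M) by fast doubling (recursion on k >> 1)
def solFd : Nat → Int × Int
  | 0 => (0, 1)
  | (k + 1) =>
    let p := solFd ((k + 1) / 2)
    let a := p.1
    let b := p.2
    let c := PySem.Int.mod (a * (2 * b - a)) 1234567
    let d := PySem.Int.mod (a * a + b * b) 1234567
    if (k + 1) % 2 = 1 then (d, PySem.Int.mod (c + d) 1234567) else (c, d)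
decreasing_by omega

def solution_alt (n : Int) : Int :=
  if n < 3 then n
  else (solFd (n + 1).toNat).1

-- ===== PRECONDITION & SPEC =====
def Spec_solution (n : Int) (out : Int) : Prop := out = solution_alt n
instance (n : Int) (out : Int) : Decidable (Spec_solution n out) := by unfold Spec_solution; infer_instance

-- ===== CLAIM (what is proved, stated in full; the proofs are below) =====
def Claim_equal_solution : Prop := ∀ (n : Int), Dom_solution n → Spec_solution n (solution n)

-- ===== LEMMAS AND PROOFS =====

-- fast-doubling identities over Int
theorem fibInt_two_mul (m : Nat) :
    ((Nat.fib (2 * m) : Int)) = (Nat.fib m : Int) * (2 * (Nat.fib (m + 1) : Int) - Nat.fib m) := by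
  have h := Nat.fib_two_mul m
  have hle : Nat.fib m ≤ 2 * Nat.fib (m + 1) :=
    le_trans (Nat.fib_le_fib_succ) (by omega)
  have h2 := congrArg (fun x : Nat => (x : Int)) h
  push_cast [Nat.cast_sub hle] at h2
  linarith

theorem fibInt_two_mul_add_one (m : Nat) :
    ((Nat.fib (2 * m + 1) : Int)) = (Nat.fib m : Int) * Nat.fib m + (Nat.fib (m + 1) : Int) * Nat.fib (m + 1) := by
  have h2 := congrArg (fun x : Nat => (x : Int)) (Nat.fib_two_mul_add_one m)
  push_cast at h2
  ring_nf at h2 ⊢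
  linarith

theorem solFd_eq (k : Nat) :
    solFd k = ((Nat.fib k : Int) % 1234567, (Nat.fib (k + 1) : Int) % 1234567) := by
  induction k using Nat.strong_induction_on with
  | _ k ih =>
    match k with
    | 0 => simp [solFd]
    | (k + 1) =>
      have hrec := ih ((k + 1) / 2) (by omega)
      rw [solFd, hrec]
      set m := (k + 1) / 2 with hm
      set M : Int := 1234567 with hM
      set A : Int := (Nat.fib m : Int) with hA
      set B : Int := (Nat.fib (m + 1) : Int) with hB
      have hmod : ∀ x : Int, PySem.Int.mod x M = x % M :=
        fun x => PySem.Int.mod_eq_emod_of_pos (by norm_num [hM])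
      have meA : (A % M) ≡ A [ZMOD M] := Int.emod_emod_of_dvd A dvd_rfl
      have meB : (B % M) ≡ B [ZMOD M] := Int.emod_emod_of_dvd B dvd_rfl
      have hc : (A % M) * (2 * (B % M) - A % M) ≡ (Nat.fib (2 * m) : Int) [ZMOD M] := by
        rw [fibInt_two_mul m, ← hA, ← hB]
        exact meA.mul ((meB.mul_left 2).sub meA)
      have hd : (A % M) * (A % M) + (B % M) * (B % M) ≡ (Nat.fib (2 * m + 1) : Int) [ZMOD M] := by
        rw [fibInt_two_mul_add_one m, ← hA, ← hB]
        exact (meA.mul meA).add (meB.mul meB)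
      simp only [hmod]
      rcases Nat.mod_two_eq_zero_or_one (k + 1) with hpar | hpar
      · -- k + 1 = 2 * m
        have hk : k + 1 = 2 * m := by omega
        simp only [hpar]
        norm_num
        rw [hk]
        exact ⟨hc, hd⟩
      · -- k + 1 = 2 * m + 1
        have hk : k + 1 = 2 * m + 1 := by omega
        simp only [hpar]
        rw [hk]
        refine Prod.ext ?_ ?_
        · exact hd
        · show (_ + _) % M = (Nat.fib (2 * m + 1 + 1) : Int) % M
          have hsum : (Nat.fib (2 * m + 1 + 1) : Int) = (Nat.fib (2 * m) : Int) + (Nat.fib (2 * m + 1) : Int) := by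
            have := Nat.fib_add_two (n := 2 * m)
            push_cast [this]
            ring
          rw [hsum]
          have mc : ((A % M) * (2 * (B % M) - A % M)) % M ≡ (Nat.fib (2 * m) : Int) [ZMOD M] :=
            (Int.emod_emod_of_dvd _ dvd_rfl).trans hc
          have md : ((A % M) * (A % M) + (B % M) * (B % M)) % M ≡ (Nat.fib (2 * m + 1) : Int) [ZMOD M] :=
            (Int.emod_emod_of_dvd _ dvd_rfl).trans hd
          exact mc.add md

-- A-side loop characterisation
theorem loopA (m : Nat) :
    (PySem.List.pyRange 3 ((m : Int) + 4) 1).foldl solStepA (0, 1, 2)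
      = ((Nat.fib (m + 4) : Int), (Nat.fib (m + 3) : Int), (Nat.fib (m + 4) : Int)) := by
  induction m with
  | zero =>
    have h4 : ((0 : Nat) : Int) + 4 = 3 + 1 := by norm_num
    rw [h4, PySem.List.pyRange_one_singleton]
    simp [solStepA]
    decide
  | succ m ih =>
    have hsplit : ((m + 1 : Nat) : Int) + 4 = ((m : Int) + 4) + 1 := by push_cast; ring
    rw [hsplit, PySem.List.pyRange_one_succ_right (by omega), List.foldl_append, ih]
    simp only [List.foldl, solStepA]
    have h5 : Nat.fib (m + 5) = Nat.fib (m + 3) + Nat.fib (m + 4) := Nat.fib_add_two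
    refine Prod.ext ?_ (Prod.ext ?_ ?_) <;> simp <;> push_cast [show m + 1 + 4 = m + 5 from rfl, show m + 1 + 3 = m + 4 from rfl, h5] <;> ring

-- ===== VERDICT (by name: the statement is the Claim_ definition above) =====
theorem solution_spec : Claim_equal_solution := by
  intro n _
  unfold Spec_solution solution solution_alt
  by_cases h : n < 3
  · simp [h]
  · obtain ⟨m, hm⟩ : ∃ m : Nat, n = (m : Int) + 3 := ⟨(n - 3).toNat, by omega⟩
    have h1 : n + 1 = (m : Int) + 4 := by omega
    have h2 : ((m : Int) + 4).toNat = m + 4 := by omega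
    simp only [if_neg h]
    rw [h1, h2, loopA, solFd_eq, PySem.Int.mod_eq_emod_of_pos (by norm_num)]
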